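-- pv_equiv track=rewrite | github.com/NVIDIA/skyhook | scripts/format_license.py | find_existing_license
-- ===== SOURCE A (Python) =====
-- from typing import Dict, List, Tuple
--
-- def find_existing_license(content: str) -> Tuple[int, int]:
--     """Find the start and end positions of an existing license header."""
--     lines = content.split('\n')
--     start_line = 0
--     end_line = 0
--
--     # Look for LICENSE START and LICENSE END markers
--     for i, line in enumerate(lines):
--         if 'LICENSE START' in line:
--             start_line = i - 1  # Include the opening comment line
--         elif 'LICENSE END' in line:
--             end_line = i + 2  # Include the closing comment line
--             break
--
--     return start_line, end_line
-- ===== SOURCE B (Python) =====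
-- def find_existing_license(content: str):
--     """Find the start and end positions of an existing license header."""
--     lines = content.split('\n')
--     # first line containing the END marker, if any
--     end_idx = next((i for i, line in enumerate(lines) if 'LICENSE END' in line), None)
--     # last line containing the START marker before the END (or anywhere if no END)
--     scan = lines if end_idx is None else lines[:end_idx]
--     start_idx = None
--     for i, line in enumerate(scan):
--         if 'LICENSE START' in line:
--             start_idx = i
--     return (start_idx - 1 if start_idx is not None else 0,
--             end_idx + 2 if end_idx is not None else 0)
-- ===== Notes on version B (the rewrite author's own statement) =====
-- stated objective: alternative
-- what changed: Replaces A's single interleaved enumerate loop (accumulating start_line, breaking at END) with two separate locating passes: first find the index of the first END-marker line, then find the last START-marker line before it (or anywhere if none); Pre_ excludes inputs where some line contains both markers, a corner where A's elif makes START win while B reads the line as the END marker and either reading is defensible.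
-- outside the precondition, e.g. on find_existing_license('LICENSE START LICENSE END'): A returns (-1, 0), B returns (0, 2)
import Mathlib
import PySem

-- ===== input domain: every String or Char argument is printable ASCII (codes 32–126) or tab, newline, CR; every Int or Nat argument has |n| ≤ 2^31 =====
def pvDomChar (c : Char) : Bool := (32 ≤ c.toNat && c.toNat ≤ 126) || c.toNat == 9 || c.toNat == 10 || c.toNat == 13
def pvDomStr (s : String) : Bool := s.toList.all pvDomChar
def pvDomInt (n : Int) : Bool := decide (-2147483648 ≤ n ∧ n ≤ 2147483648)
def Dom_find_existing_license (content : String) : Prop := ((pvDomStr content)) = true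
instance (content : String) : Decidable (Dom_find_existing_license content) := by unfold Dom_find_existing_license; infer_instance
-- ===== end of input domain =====

-- B replaces A's single interleaved loop with two locating passes (first END line, then last START before it); alternative decomposition, same cost.

-- content.split('\n'): split? returns none only for sep = "", so getD [] is exact here
def pvSplitNl (s : String) : List String := (PySem.Str.split? s "\n").getD []

-- ===== PORT A =====
-- the for-loop of A: i is the enumerate index, s the running start_line accumulator
def pvLoopA : List String → Nat → Int → Int × Int
  | [], _, s => (s, 0)
  | l :: rest, i, s =>
    if PySem.Str.isIn "LICENSE START" l then pvLoopA rest (i+1) ((i : Int) - 1)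
    else if PySem.Str.isIn "LICENSE END" l then (s, (i : Int) + 2)
    else pvLoopA rest (i+1) s

def find_existing_license (content : String) : Int × Int :=
  pvLoopA (pvSplitNl content) 0 0

-- ===== PORT B =====
-- pass 2 of Source B: forward loop keeping the index of the last START marker
def pvLastStart : List String → Nat → Option Nat → Option Nat
  | [], _, acc => acc
  | l :: rest, i, acc =>
      pvLastStart rest (i+1) (if PySem.Str.isIn "LICENSE START" l then some i else acc)

def find_existing_license_alt (content : String) : Int × Int :=
  let lines := pvSplitNl content
  -- pass 1 of Source B: first line containing 'LICENSE END'
  let endIdx? := lines.findIdx? (fun l => PySem.Str.isIn "LICENSE END" l)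
  let scan := match endIdx? with | none => lines | some e => lines.take e
  let startIdx? := pvLastStart scan 0 none
  ((match startIdx? with | none => 0 | some k => (k : Int) - 1),
   (match endIdx? with | none => 0 | some e => (e : Int) + 2))

-- ===== PRECONDITION & SPEC =====
-- Pre_ excludes inputs where some line contains both 'LICENSE START' and 'LICENSE END':
-- there A's elif lets START win while B reads the line as the END marker; either reading is defensible.
def Pre_find_existing_license (content : String) : Prop :=
  ((pvSplitNl content).all (fun l =>
    !(PySem.Str.isIn "LICENSE START" l && PySem.Str.isIn "LICENSE END" l))) = true
instance (content : String) : Decidable (Pre_find_existing_license content) := by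
  unfold Pre_find_existing_license; infer_instance

def pvWitness_find_existing_license : String :=
  "# LICENSE START\n# hi\n# LICENSE END\ncode"

def Spec_find_existing_license (content : String) (out : Int × Int) : Prop := out = find_existing_license_alt content
instance (content : String) (out : Int × Int) : Decidable (Spec_find_existing_license content out) := by unfold Spec_find_existing_license; infer_instance

-- ===== CLAIM =====
def Claim_equal_find_existing_license : Prop := ∀ (content : String), Dom_find_existing_license content → Pre_find_existing_license content → Spec_find_existing_license content (find_existing_license content)

-- ===== LEMMAS AND PROOFS =====

-- accumulator lemma: the last-START loop only uses acc when no later match exists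
theorem pvLastStart_acc (xs : List String) (i : Nat) (a : Option Nat) :
    pvLastStart xs i a = match pvLastStart xs i none with
      | some k => some k
      | none => a := by
  induction xs generalizing i a with
  | nil => simp only [pvLastStart]
  | cons l rest ih =>
    cases h : PySem.Str.isIn "LICENSE START" l with
    | true =>
      simp only [pvLastStart, h, Bool.false_eq_true, eq_self_iff_true, if_true, if_false]
      rw [ih (i+1) (some i)]
      cases pvLastStart rest (i+1) none <;> simp
    | false =>
      simp only [pvLastStart, h, Bool.false_eq_true, eq_self_iff_true, if_true, if_false]
      rw [ih (i+1) a]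

-- characterisation of A's loop as B's two passes, on line lists where no line holds both markers
theorem pvLoopA_eq (xs : List String)
    (hx : xs.all (fun l =>
      !(PySem.Str.isIn "LICENSE START" l && PySem.Str.isIn "LICENSE END" l)) = true)
    (i : Nat) (s : Int) :
    pvLoopA xs i s =
      (match xs.findIdx? (fun l => PySem.Str.isIn "LICENSE END" l) with
       | none =>
         ((match pvLastStart xs i none with | none => s | some k => (k : Int) - 1), 0)
       | some e =>
         ((match pvLastStart (xs.take e) i none with | none => s | some k => (k : Int) - 1),
          (i : Int) + (e : Int) + 2)) := by
  induction xs generalizing i s with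
  | nil => simp only [pvLoopA, pvLastStart, List.findIdx?_nil]
  | cons l rest ih =>
    simp only [List.all_cons, Bool.and_eq_true, Bool.not_eq_true'] at hx
    obtain ⟨hl, hrest⟩ := hx
    rw [List.findIdx?_cons]
    cases hs : PySem.Str.isIn "LICENSE START" l with
    | true =>
      have he : PySem.Str.isIn "LICENSE END" l = false := by
        cases h : PySem.Str.isIn "LICENSE END" l
        · rfl
        · rw [hs, h] at hl; exact absurd hl (by simp)
      simp only [pvLoopA, hs, he, Bool.false_eq_true, eq_self_iff_true, if_true, if_false]
      rw [ih hrest (i+1) ((i : Int) - 1)]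
      cases hfind : rest.findIdx? (fun l => PySem.Str.isIn "LICENSE END" l) with
      | none =>
        simp only [Bool.false_eq_true, eq_self_iff_true, if_true, if_false, Option.map_none]
        rw [show pvLastStart (l :: rest) i none = pvLastStart rest (i+1) (some i) by
          simp only [pvLastStart, hs, Bool.false_eq_true, eq_self_iff_true, if_true, if_false]]
        rw [pvLastStart_acc rest (i+1) (some i)]
        cases pvLastStart rest (i+1) none <;> simp
      | some e =>
        simp only [Bool.false_eq_true, eq_self_iff_true, if_true, if_false, Option.map_some]
        rw [show (l :: rest).take (e+1) = l :: rest.take e by simp]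
        rw [show pvLastStart (l :: rest.take e) i none = pvLastStart (rest.take e) (i+1) (some i) by
          simp only [pvLastStart, hs, Bool.false_eq_true, eq_self_iff_true, if_true, if_false]]
        rw [pvLastStart_acc (rest.take e) (i+1) (some i)]
        cases pvLastStart (rest.take e) (i+1) none <;> simp <;> push_cast <;> ring
    | false =>
      cases he : PySem.Str.isIn "LICENSE END" l with
      | true =>
        simp only [pvLoopA, hs, he, Bool.false_eq_true, eq_self_iff_true, if_true, if_false]
        rw [List.take_zero]
        simp only [pvLastStart]
        norm_num
      | false =>
        simp only [pvLoopA, hs, he, Bool.false_eq_true, eq_self_iff_true, if_true, if_false]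
        rw [ih hrest (i+1) s]
        cases hfind : rest.findIdx? (fun l => PySem.Str.isIn "LICENSE END" l) with
        | none =>
          simp only [Bool.false_eq_true, eq_self_iff_true, if_true, if_false, Option.map_none]
          rw [show pvLastStart (l :: rest) i none = pvLastStart rest (i+1) none by
            simp only [pvLastStart, hs, Bool.false_eq_true, eq_self_iff_true, if_true, if_false]]
        | some e =>
          simp only [Bool.false_eq_true, eq_self_iff_true, if_true, if_false, Option.map_some]
          rw [show (l :: rest).take (e+1) = l :: rest.take e by simp]
          rw [show pvLastStart (l :: rest.take e) i none = pvLastStart (rest.take e) (i+1) none by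
            simp only [pvLastStart, hs, Bool.false_eq_true, eq_self_iff_true, if_true, if_false]]
          cases pvLastStart (rest.take e) (i+1) none <;> simp <;> push_cast <;> ring

-- ===== VERDICT =====
theorem find_existing_license_spec : Claim_equal_find_existing_license := by
  intro content _ hpre
  unfold Spec_find_existing_license find_existing_license find_existing_license_alt
  rw [pvLoopA_eq _ hpre]
  cases hfind : (pvSplitNl content).findIdx? (fun l => PySem.Str.isIn "LICENSE END" l) with
  | none => simp only [hfind]
  | some e => simp only [hfind]; norm_num
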